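-- pv_equiv track=rewrite | github.com/Jakobus51/GooiseTafel | backEnd/uaLabel.py | divideByEights
-- ===== SOURCE A (Python) =====
-- def divideByEights(number: int) -> list[int]:
--     """Divides a random number by eights and a rest value
--     example: 22 will become [8,8,6]
--
--     Args:
--         number (int): The number you want to divide
--
--     Returns:
--         list[int]: The list of eights + rest value
--     """
--     parts = []
--     while number >= 8:
--         parts.append(8)
--         number -= 8
--     if number > 0:
--         parts.append(number)
--     return parts
-- ===== SOURCE B (Python) =====
-- def divideByEights(number: int) -> list[int]:
--     if number <= 0:
--         return []
--     q, r = divmod(number, 8)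
--     return [8] * q + ([r] if r else [])
-- ===== Notes on version B (the rewrite author's own statement) =====
-- stated objective: simpler
-- what changed: Replaced the repeated-subtraction while loop with a closed-form divmod: q eights built by list multiplication plus an optional remainder element.
import Mathlib
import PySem

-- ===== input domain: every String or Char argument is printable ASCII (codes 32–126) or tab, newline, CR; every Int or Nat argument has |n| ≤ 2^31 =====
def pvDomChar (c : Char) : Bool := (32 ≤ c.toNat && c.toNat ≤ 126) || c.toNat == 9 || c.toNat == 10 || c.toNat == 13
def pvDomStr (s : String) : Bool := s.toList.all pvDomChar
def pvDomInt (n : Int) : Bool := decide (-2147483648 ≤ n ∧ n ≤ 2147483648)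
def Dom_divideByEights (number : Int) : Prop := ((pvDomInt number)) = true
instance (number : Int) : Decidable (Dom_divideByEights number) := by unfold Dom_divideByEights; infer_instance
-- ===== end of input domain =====

-- B replaces A's repeated-subtraction while loop with a closed-form divmod (simpler).

-- ===== PORT A =====
-- while number >= 8: parts.append(8); number -= 8
def divideByEightsLoop (parts : List Int) (number : Int) : List Int :=
  if h : number ≥ 8 then
    divideByEightsLoop (parts ++ [8]) (number - 8)
  else
    if number > 0 then parts ++ [number] else parts
termination_by number.toNat
decreasing_by omega

def divideByEights (number : Int) : List Int :=
  divideByEightsLoop [] number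

-- ===== PORT B =====
def divideByEights_alt (number : Int) : List Int :=
  if number ≤ 0 then []
  else
    let q := PySem.Int.floordiv number 8
    let r := PySem.Int.mod number 8
    List.replicate q.toNat 8 ++ (if r ≠ 0 then [r] else [])

-- ===== PRECONDITION & SPEC =====
def Spec_divideByEights (number : Int) (out : List Int) : Prop := out = divideByEights_alt number
instance (number : Int) (out : List Int) : Decidable (Spec_divideByEights number out) := by unfold Spec_divideByEights; infer_instance

-- ===== CLAIM (what is proved, stated in full; the proofs are below) =====
def Claim_equal_divideByEights : Prop := ∀ (number : Int), Dom_divideByEights number → Spec_divideByEights number (divideByEights number)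

-- ===== LEMMAS AND PROOFS =====

theorem divideByEights_alt_step (n : Int) (h : n ≥ 8) :
    divideByEights_alt n = 8 :: divideByEights_alt (n - 8) := by
  unfold divideByEights_alt
  rw [PySem.Int.floordiv_eq_ediv_of_pos (by omega), PySem.Int.floordiv_eq_ediv_of_pos (by omega),
      PySem.Int.mod_eq_emod_of_pos (by omega), PySem.Int.mod_eq_emod_of_pos (by omega)]
  have hq : (n / 8).toNat = ((n - 8) / 8).toNat + 1 := by omega
  have hr : n % 8 = (n - 8) % 8 := by omega
  by_cases h8 : n - 8 ≤ 0
  · have hn8 : n = 8 := by omega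
    subst hn8; decide
  · simp only [if_neg (by omega : ¬ n ≤ 0), if_neg h8, hq, hr, List.replicate_succ, List.cons_append]

theorem divideByEightsLoop_eq (k : Nat) : ∀ (parts : List Int) (n : Int), n.toNat ≤ k →
    divideByEightsLoop parts n = parts ++ divideByEights_alt n := by
  induction k with
  | zero =>
    intro parts n hn
    unfold divideByEightsLoop divideByEights_alt
    rw [dif_neg (by omega), if_neg (by omega), if_pos (by omega)]
    simp
  | succ k ih =>
    intro parts n hn
    unfold divideByEightsLoop
    by_cases h : n ≥ 8
    · rw [dif_pos h, ih _ _ (by omega), divideByEights_alt_step n h]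
      simp
    · rw [dif_neg h]
      unfold divideByEights_alt
      by_cases hp : n > 0
      · rw [if_pos hp, if_neg (by omega)]
        rw [PySem.Int.floordiv_eq_ediv_of_pos (by omega), PySem.Int.mod_eq_emod_of_pos (by omega)]
        have hq : (n / 8).toNat = 0 := by omega
        have hr : n % 8 = n := by omega
        have hnz : ¬ n = 0 := by omega
        simp [hq, hr, hnz]
      · have hle : n ≤ 0 := by omega
        simp [hp, hle]

-- ===== VERDICT (by name: the statement is the Claim_ definition above) =====
theorem divideByEights_spec : Claim_equal_divideByEights := by
  intro n _
  unfold Spec_divideByEights divideByEights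
  simpa using divideByEightsLoop_eq n.toNat [] n le_rfl
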